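-- pv_equiv track=rewrite | github.com/gFrincu/AdventOfCode | 2024/day3.py | remove_disabled_sections
-- ===== SOURCE A (Python) =====
-- def remove_disabled_sections(data):
--     result = []
--     enabled = True
--     i = 0
--
--     while i < len(data):
--         if data[i:i+7] == "don't()":
--             enabled = False
--             i += 7
--         elif data[i:i+4] == "do()":
--             enabled = True
--             i += 4
--         elif enabled:
--             result.append(data[i])
--             i += 1
--         else:
--             i += 1
--
--     return ''.join(result)
-- ===== SOURCE B (Python) =====
-- def remove_disabled_sections(data):
--     pieces = data.split("don't()")
--     out = [pieces[0].replace("do()", "")]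
--     for piece in pieces[1:]:
--         idx = piece.find("do()")
--         if idx != -1:
--             out.append(piece[idx + 4:].replace("do()", ""))
--     return ''.join(out)
-- ===== Notes on version B (the rewrite author's own statement) =====
-- stated objective: faster
-- what changed: Replaced the char-by-char enabled/disabled state machine with a split on "don't()" into segments, keeping the first segment and, for each later segment, only the part after its first "do()", with remaining "do()" markers removed via replace.
import Mathlib
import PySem

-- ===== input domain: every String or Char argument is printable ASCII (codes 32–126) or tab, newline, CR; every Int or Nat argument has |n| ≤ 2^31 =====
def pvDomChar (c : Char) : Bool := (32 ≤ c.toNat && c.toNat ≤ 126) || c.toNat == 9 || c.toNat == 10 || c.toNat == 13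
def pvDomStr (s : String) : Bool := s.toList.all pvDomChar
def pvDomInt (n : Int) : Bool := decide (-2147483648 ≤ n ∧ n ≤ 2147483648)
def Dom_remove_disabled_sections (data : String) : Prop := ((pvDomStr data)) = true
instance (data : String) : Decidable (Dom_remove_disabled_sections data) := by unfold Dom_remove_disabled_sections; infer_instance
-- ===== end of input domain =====

-- B replaces A's char-by-char enabled/disabled state machine by split-on-"don't()" plus per-segment find/replace of "do()" (measured faster by a constant factor in Python; return value proved identical).

-- ===== PORT A =====
-- A's while loop over index i, kept as structural recursion on the remaining suffix of the
-- string; the slice comparison data[i:i+7] == "don't()" becomes List.take 7 on the suffix.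
def pvLoopA (l : List Char) (enabled : Bool) : List Char :=
  match l with
  | [] => []
  | c :: rest =>
    if List.take 7 (c :: rest) = "don't()".toList then pvLoopA (List.drop 7 (c :: rest)) false
    else if List.take 4 (c :: rest) = "do()".toList then pvLoopA (List.drop 4 (c :: rest)) true
    else if enabled then c :: pvLoopA rest enabled
    else pvLoopA rest enabled
termination_by l.length
decreasing_by all_goals (simp; try omega)

def remove_disabled_sections (data : String) : String :=
  String.ofList (pvLoopA data.toList true)

-- ===== PORT B =====
def remove_disabled_sections_alt (data : String) : String :=
  match PySem.Chars.splitOn data.toList "don't()".toList with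
  | [] => ""   -- unreachable: str.split always returns at least one piece
  | p0 :: rest =>
    let out := rest.foldl (fun acc piece =>
      let idx := PySem.Chars.find piece "do()".toList
      if idx != -1 then
        acc ++ [PySem.Chars.replace (PySem.List.slice piece (some (idx + 4)) none) "do()".toList []]
      else acc) [PySem.Chars.replace p0 "do()".toList []]
    String.ofList (PySem.Chars.join [] out)

-- ===== PRECONDITION & SPEC =====
def Spec_remove_disabled_sections (data : String) (out : String) : Prop := out = remove_disabled_sections_alt data
instance (data : String) (out : String) : Decidable (Spec_remove_disabled_sections data out) := by unfold Spec_remove_disabled_sections; infer_instance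

-- ===== CLAIM (what is proved, stated in full; the proofs are below) =====
def Claim_equal_remove_disabled_sections : Prop := ∀ (data : String), Dom_remove_disabled_sections data → Spec_remove_disabled_sections data (remove_disabled_sections data)

-- ===== LEMMAS AND PROOFS =====

def pvConsHead (c : Char) : List (List Char) → List (List Char)
  | [] => [[c]]
  | x :: xs => (c :: x) :: xs
def pvSSplit (l : List Char) : List (List Char) :=
  match l with
  | [] => [[]]
  | c :: t =>
    if "don't()".toList <+: (c :: t) then [] :: pvSSplit (List.drop 7 (c :: t))
    else pvConsHead c (pvSSplit t)
termination_by l.length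
decreasing_by all_goals (simp; try omega)

lemma pvSSplit_ne_nil (l : List Char) : pvSSplit l ≠ [] := by
  cases l with
  | nil => simp [pvSSplit]
  | cons c t =>
    rw [pvSSplit]
    split_ifs
    · simp
    · cases h : pvSSplit t <;> simp [pvConsHead]

lemma pvJoinNil (l : List (List Char)) : PySem.Chars.join [] l = l.flatten := by
  unfold PySem.Chars.join
  induction l with
  | nil => rfl
  | cons h t ih => cases t <;> simp_all [List.intercalate]

lemma pvFindGoShift : ∀ (l : List Char) (k : Nat),
    PySem.Chars.find.go "do()".toList l k =
      if PySem.Chars.find l "do()".toList = -1 then -1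
      else PySem.Chars.find l "do()".toList + k := by
  intro l
  induction l with
  | nil => intro k; rfl
  | cons c t ih =>
    intro k
    show (if "do()".toList.isPrefixOf (c::t) then (k:Int) else PySem.Chars.find.go "do()".toList t (k+1)) = _
    have hfc : PySem.Chars.find (c::t) "do()".toList =
        if "do()".toList.isPrefixOf (c::t) then (0:Int) else PySem.Chars.find.go "do()".toList t 1 := rfl
    by_cases hp : "do()".toList.isPrefixOf (c::t)
    · rw [if_pos hp, hfc, if_pos hp]
      rw [if_neg (by omega : ¬ (0:Int) = -1)]
      omega
    · rw [if_neg hp, hfc, if_neg hp, ih]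
      have h1 := PySem.Chars.neg_one_le_find t "do()".toList
      show _ = if PySem.Chars.find.go "do()".toList t 1 = -1 then _ else _
      rw [ih]
      split_ifs <;> omega

def pvSRepl (l : List Char) : List Char :=
  match l with
  | [] => []
  | c :: t =>
    if "do()".toList <+: (c :: t) then pvSRepl (List.drop 4 (c :: t))
    else c :: pvSRepl t
termination_by l.length
decreasing_by all_goals (simp; try omega)

def pvProc (l : List Char) : List Char :=
  match l with
  | [] => []
  | c :: t =>
    if "do()".toList <+: (c :: t) then pvSRepl (List.drop 4 (c :: t))
    else pvProc t
termination_by l.length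
decreasing_by all_goals (simp; try omega)

lemma pvReplaceGo : ∀ (fuel : Nat) (l acc : List Char), l.length ≤ fuel →
    PySem.Chars.replace.go "do()".toList [] fuel l acc = acc.reverse ++ pvSRepl l := by
  intro fuel
  induction fuel with
  | zero =>
    intro l acc hl
    have : l = [] := by cases l <;> simp_all
    subst this
    have h0 : PySem.Chars.replace.go ['d','o','(',')'] [] 0 [] acc = acc.reverse ++ [] := rfl
    simp [pvSRepl, h0]
  | succ n ih =>
    intro l acc hl
    cases l with
    | nil =>
      have h0 : PySem.Chars.replace.go ['d','o','(',')'] [] (n+1) [] acc = acc.reverse := rfl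
      simp [pvSRepl, h0]
    | cons c t =>
      show (if "do()".toList.isPrefixOf (c::t) then
             PySem.Chars.replace.go "do()".toList [] n (List.drop 4 (c::t)) (List.reverse [] ++ acc)
           else PySem.Chars.replace.go "do()".toList [] n t (c :: acc)) = _
      rw [pvSRepl]
      by_cases hp : "do()".toList <+: (c::t)
      · rw [if_pos ((List.isPrefixOf_iff_prefix).2 hp), if_pos hp]
        simp only [List.reverse_nil, List.nil_append]
        exact ih _ _ (by simp at hl ⊢; omega)
      · rw [if_neg (fun h => hp ((List.isPrefixOf_iff_prefix).1 h)), if_neg hp]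
        rw [ih _ _ (by simp at hl ⊢; omega)]
        simp

lemma pvReplaceEq (p : List Char) : PySem.Chars.replace p "do()".toList [] = pvSRepl p := by
  show (if ("do()".toList.isEmpty) = true then _ else PySem.Chars.replace.go "do()".toList [] p.length p []) = _
  rw [if_neg (by decide)]
  rw [pvReplaceGo p.length p [] le_rfl]
  simp

lemma pvSplitGo : ∀ (fuel : Nat) (l cur : List Char) (acc : List (List Char)), l.length < fuel →
    PySem.Chars.splitOn.go "don't()".toList fuel l cur acc =
      acc.reverse ++ (match pvSSplit l with
                      | [] => [cur.reverse]
                      | x :: xs => (cur.reverse ++ x) :: xs) := by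
  intro fuel
  induction fuel with
  | zero => intro l cur acc hl; omega
  | succ n ih =>
    intro l cur acc hl
    cases l with
    | nil =>
      have h0 : PySem.Chars.splitOn.go "don't()".toList (n+1) [] cur acc = (cur.reverse :: acc).reverse := rfl
      rw [h0, pvSSplit]
      simp
    | cons c t =>
      show (if "don't()".toList.isPrefixOf (c::t) then
              PySem.Chars.splitOn.go "don't()".toList n (List.drop 7 (c::t)) [] (cur.reverse :: acc)
            else PySem.Chars.splitOn.go "don't()".toList n t (c :: cur) acc) = _
      rw [pvSSplit]
      by_cases hp : "don't()".toList <+: (c::t)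
      · rw [if_pos ((List.isPrefixOf_iff_prefix).2 hp), if_pos hp]
        rw [ih _ _ _ (by simp at hl ⊢; omega)]
        cases hq : pvSSplit (List.drop 7 (c::t)) with
        | nil => exact absurd hq (pvSSplit_ne_nil _)
        | cons q qs => simp
      · rw [if_neg (fun h => hp ((List.isPrefixOf_iff_prefix).1 h)), if_neg hp]
        rw [ih _ _ _ (by simp at hl ⊢; omega)]
        cases hq : pvSSplit t with
        | nil => exact absurd hq (pvSSplit_ne_nil _)
        | cons q qs => simp [pvConsHead]

lemma pvSplitEq (l : List Char) : PySem.Chars.splitOn l "don't()".toList = pvSSplit l := by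
  show PySem.Chars.splitOn.go "don't()".toList (l.length + 1) l [] [] = _
  rw [pvSplitGo _ _ _ _ (by omega)]
  cases hq : pvSSplit l with
  | nil => exact absurd hq (pvSSplit_ne_nil _)
  | cons q qs => simp

lemma pvSSplit_head_prefix : ∀ (n : Nat) (l : List Char), l.length ≤ n →
    ∀ p0 rest, pvSSplit l = p0 :: rest → p0 <+: l := by
  intro n
  induction n with
  | zero =>
    intro l hl p0 rest h
    have : l = [] := by cases l <;> simp_all
    subst this
    rw [pvSSplit] at h
    cases h
    exact List.nil_prefix
  | succ n ih =>
    intro l hl p0 rest h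
    cases l with
    | nil => rw [pvSSplit] at h; cases h; exact List.nil_prefix
    | cons c t =>
      rw [pvSSplit] at h
      split_ifs at h with hp
      · cases h; exact List.nil_prefix
      · cases hq : pvSSplit t with
        | nil => exact absurd hq (pvSSplit_ne_nil _)
        | cons q qs =>
          rw [hq] at h
          simp only [pvConsHead] at h
          injection h with h1 h2
          subst h1
          exact List.cons_prefix_cons.2 ⟨rfl, ih t (by simp at hl; omega) q qs hq⟩

lemma pvProcFind : ∀ (n : Nat) (p : List Char), p.length ≤ n →
    (PySem.Chars.find p "do()".toList = -1 → pvProc p = []) ∧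
    (PySem.Chars.find p "do()".toList ≠ -1 →
      0 ≤ PySem.Chars.find p "do()".toList ∧
      pvProc p = pvSRepl (List.drop ((PySem.Chars.find p "do()".toList).toNat + 4) p)) := by
  intro n
  induction n with
  | zero =>
    intro p hp
    have : p = [] := by cases p <;> simp_all
    subst this
    refine ⟨fun _ => by rw [pvProc], fun h => absurd rfl h⟩
  | succ n ih =>
    intro p hp
    cases p with
    | nil => exact ⟨fun _ => by rw [pvProc], fun h => absurd rfl h⟩
    | cons c t =>
      have hfc : PySem.Chars.find (c::t) "do()".toList =
          if "do()".toList.isPrefixOf (c::t) then (0:Int) else PySem.Chars.find.go "do()".toList t 1 := rfl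
      by_cases hpre : "do()".toList <+: (c::t)
      · rw [hfc, if_pos ((List.isPrefixOf_iff_prefix).2 hpre)]
        refine ⟨fun h => absurd h (by omega), fun _ => ⟨le_rfl, ?_⟩⟩
        rw [pvProc, if_pos hpre]
        norm_num
      · rw [hfc, if_neg (fun h => hpre ((List.isPrefixOf_iff_prefix).1 h)), pvFindGoShift]
        have ht := ih t (by simp at hp; omega)
        have h1 := PySem.Chars.neg_one_le_find t "do()".toList
        by_cases hm : PySem.Chars.find t "do()".toList = -1
        · rw [if_pos hm]
          exact ⟨fun _ => by rw [pvProc, if_neg hpre]; exact ht.1 hm, fun h => absurd rfl h⟩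
        · rw [if_neg hm]
          obtain ⟨hge, hpe⟩ := ht.2 hm
          refine ⟨fun h => absurd h (by omega), fun _ => ⟨by omega, ?_⟩⟩
          rw [pvProc, if_neg hpre, hpe]
          congr 1
          have : (PySem.Chars.find t "do()".toList + ((1:Nat):Int)).toNat
              = (PySem.Chars.find t "do()".toList).toNat + 1 := by omega
          rw [this]
          rfl

def pvBT (l : List Char) : List Char :=
  match pvSSplit l with
  | [] => []
  | p0 :: rest => pvSRepl p0 ++ (rest.map pvProc).flatten

def pvBF (l : List Char) : List Char := ((pvSSplit l).map pvProc).flatten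

lemma pvTake7 (l : List Char) : (List.take 7 l = "don't()".toList) ↔ ("don't()".toList <+: l) := by
  rw [List.prefix_iff_eq_take]
  exact ⟨fun h => h.symm, fun h => h.symm⟩

lemma pvTake4 (l : List Char) : (List.take 4 l = "do()".toList) ↔ ("do()".toList <+: l) := by
  rw [List.prefix_iff_eq_take]
  exact ⟨fun h => h.symm, fun h => h.symm⟩

lemma pvSSplit_d4 (m : List Char) :
    pvSSplit ('d'::'o'::'('::')'::m) =
      match pvSSplit m with
      | [] => [['d','o','(',')']]
      | q :: qs => ('d'::'o'::'('::')'::q) :: qs := by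
  have h1 : ¬ ("don't()".toList <+: ('d'::'o'::'('::')'::m)) := by
    intro h; simp [List.cons_prefix_cons] at h
  have h2 : ¬ ("don't()".toList <+: ('o'::'('::')'::m)) := by
    intro h; simp [List.cons_prefix_cons] at h
  have h3 : ¬ ("don't()".toList <+: ('('::')'::m)) := by
    intro h; simp [List.cons_prefix_cons] at h
  have h4 : ¬ ("don't()".toList <+: (')'::m)) := by
    intro h; simp [List.cons_prefix_cons] at h
  rw [pvSSplit, if_neg h1, pvSSplit, if_neg h2, pvSSplit, if_neg h3, pvSSplit, if_neg h4]
  cases hq : pvSSplit m with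
  | nil => exact absurd hq (pvSSplit_ne_nil _)
  | cons q qs => simp [pvConsHead]

lemma pvMain : ∀ (n : Nat) (l : List Char), l.length ≤ n →
    pvLoopA l true = pvBT l ∧ pvLoopA l false = pvBF l := by
  intro n
  induction n with
  | zero =>
    intro l hl
    have : l = [] := by cases l <;> simp_all
    subst this
    constructor
    · rw [pvLoopA]; simp [pvBT, pvSSplit, pvSRepl]
    · rw [pvLoopA]; simp [pvBF, pvSSplit]; rw [pvProc]
  | succ n ih =>
    intro l hl
    cases l with
    | nil =>
      constructor
      · rw [pvLoopA]; simp [pvBT, pvSSplit, pvSRepl]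
      · rw [pvLoopA]; simp [pvBF, pvSSplit, pvProc]
    | cons c t =>
      by_cases h7 : "don't()".toList <+: (c :: t)
      · have ihd := ih (List.drop 7 (c :: t)) (by simp at hl ⊢; omega)
        have hL : ∀ e, pvLoopA (c :: t) e = pvLoopA (List.drop 7 (c :: t)) false := by
          intro e; rw [pvLoopA, if_pos ((pvTake7 _).2 h7)]
        have hsp : pvSSplit (c :: t) = [] :: pvSSplit (List.drop 7 (c :: t)) := by
          rw [pvSSplit, if_pos h7]
        constructor
        · rw [hL, ihd.2]
          simp only [pvBT, hsp, pvBF]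
          rw [pvSRepl]
          cases hq : pvSSplit (List.drop 7 (c::t)) with
          | nil => exact absurd hq (pvSSplit_ne_nil _)
          | cons q qs => simp
        · rw [hL, ihd.2]
          simp only [pvBF, hsp, List.map_cons, List.flatten_cons]
          rw [show pvProc [] = [] from by rw [pvProc]]
          simp
      · by_cases h4 : "do()".toList <+: (c :: t)
        · obtain ⟨m, hm⟩ := h4
          have hct : c :: t = 'd'::'o'::'('::')'::m := by rw [← hm]; rfl
          have hmlen : m.length ≤ n := by
            have := congrArg List.length hct
            simp at this hl; omega
          have ihm := ih m hmlen
          have hd4 : List.drop 4 (c :: t) = m := by rw [hct]; rfl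
          have hL : ∀ e, pvLoopA (c :: t) e = pvLoopA m true := by
            intro e
            rw [pvLoopA, if_neg (fun h => h7 ((pvTake7 _).1 h)),
               if_pos ((pvTake4 _).2 ⟨m, hm⟩), hd4]
          have hpre4 : ∀ q : List Char, "do()".toList <+: ('d'::'o'::'('::')'::q) := by
            intro q; exact ⟨q, rfl⟩
          cases hq : pvSSplit m with
          | nil => exact absurd hq (pvSSplit_ne_nil _)
          | cons q qs =>
            have hsp : pvSSplit (c :: t) = ('d'::'o'::'('::')'::q) :: qs := by
              rw [hct, pvSSplit_d4, hq]
            have hrepl : pvSRepl ('d'::'o'::'('::')'::q) = pvSRepl q := by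
              rw [pvSRepl, if_pos (hpre4 q)]; rfl
            have hproc : pvProc ('d'::'o'::'('::')'::q) = pvSRepl q := by
              rw [pvProc, if_pos (hpre4 q)]; rfl
            constructor
            · rw [hL, ihm.1]
              simp only [pvBT, hsp, hq, hrepl]
            · rw [hL, ihm.1]
              simp only [pvBT, pvBF, hsp, hq]
              simp [hproc]
        · have iht := ih t (by simp at hl; omega)
          have hL : ∀ e, pvLoopA (c :: t) e =
              if e then c :: pvLoopA t e else pvLoopA t e := by
            intro e
            rw [pvLoopA, if_neg (fun h => h7 ((pvTake7 _).1 h)),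
               if_neg (fun h => h4 ((pvTake4 _).1 h))]
          cases hq : pvSSplit t with
          | nil => exact absurd hq (pvSSplit_ne_nil _)
          | cons q qs =>
            have hqpre : q <+: t := pvSSplit_head_prefix t.length t le_rfl q qs hq
            have hsp : pvSSplit (c :: t) = (c :: q) :: qs := by
              rw [pvSSplit, if_neg h7, hq]; rfl
            have hnot4 : ¬ ("do()".toList <+: (c :: q)) :=
              fun h => h4 (h.trans (List.cons_prefix_cons.2 ⟨rfl, hqpre⟩))
            constructor
            · rw [hL, if_pos rfl, iht.1]
              simp only [pvBT, hsp, hq]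
              rw [pvSRepl, if_neg hnot4]
              simp
            · rw [hL, if_neg (by simp), iht.2]
              simp only [pvBF, hsp, hq, List.map_cons, List.flatten_cons]
              have hpq : pvProc (c :: q) = pvProc q := by rw [pvProc, if_neg hnot4]
              rw [hpq]

lemma pvRestEq : ∀ rs : List (List Char),
    ((rs.filter (fun piece => PySem.Chars.find piece "do()".toList != -1)).map
      (fun piece => PySem.Chars.replace
        (PySem.List.slice piece (some (PySem.Chars.find piece "do()".toList + 4)) none)
        "do()".toList [])).flatten
    = (rs.map pvProc).flatten := by
  intro rs
  induction rs with
  | nil => rfl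
  | cons r rs ih =>
    by_cases hm : PySem.Chars.find r "do()".toList = -1
    · rw [List.filter_cons_of_neg (by simpa using hm), ih, List.map_cons, List.flatten_cons,
         (pvProcFind r.length r le_rfl).1 hm]
      rfl
    · obtain ⟨hge, hpe⟩ := (pvProcFind r.length r le_rfl).2 hm
      rw [List.filter_cons_of_pos (by simpa using hm), List.map_cons, List.flatten_cons,
          List.map_cons, List.flatten_cons, ih]
      congr 1
      rw [PySem.List.slice_from r (by omega : (0:Int) ≤ PySem.Chars.find r "do()".toList + 4), pvReplaceEq, hpe]
      congr 2
      omega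

lemma pvAltEq (data : String) : remove_disabled_sections_alt data = String.ofList (pvBT data.toList) := by
  unfold remove_disabled_sections_alt
  rw [pvSplitEq]
  cases hq : pvSSplit data.toList with
  | nil => exact absurd hq (pvSSplit_ne_nil _)
  | cons p0 rest =>
    simp only []
    have hfold : rest.foldl (fun acc piece =>
        let idx := PySem.Chars.find piece "do()".toList
        if idx != -1 then
          acc ++ [PySem.Chars.replace (PySem.List.slice piece (some (idx + 4)) none) "do()".toList []]
        else acc) [PySem.Chars.replace p0 "do()".toList []]
      = [PySem.Chars.replace p0 "do()".toList []] ++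
        (rest.filter (fun piece => PySem.Chars.find piece "do()".toList != -1)).map
          (fun piece => PySem.Chars.replace
            (PySem.List.slice piece (some (PySem.Chars.find piece "do()".toList + 4)) none)
            "do()".toList []) :=
      PySem.List.foldl_append_if _ _ rest _
    rw [hfold, pvJoinNil]
    simp only [List.cons_append, List.nil_append, List.flatten_cons]
    rw [pvRestEq, pvReplaceEq]
    simp only [pvBT, hq]

-- ===== VERDICT (by name: the statement is the Claim_ definition above) =====
theorem remove_disabled_sections_spec : Claim_equal_remove_disabled_sections := by
  intro data _
  unfold Spec_remove_disabled_sections remove_disabled_sections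
  rw [pvAltEq, (pvMain data.toList.length data.toList le_rfl).1]
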